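-- pv_equiv track=rewrite | github.com/Erynvorn/Training-Python-2019 | sternBrocot.py | stern_brocot
-- ===== SOURCE A (Python) =====
-- def stern_brocot(n):
--     """
--     Input:
--     n - desired term generated in the Stern-Brocot Sequence
--
--     Return:
--     index of first occurence of n
--     """
--     ret = [1,1]
--     count = 1
--
--     while n not in ret:
--         ret.append(ret[count]+ret[count-1])
--         ret.append(ret[count])
--         count += 1
--
--     return ret.index(n)
-- ===== SOURCE B (Python) =====
-- def _fusc(k):
--     # Stern's diatomic function by binary recursion: fusc(2k)=fusc(k), fusc(2k+1)=fusc(k)+fusc(k+1)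
--     if k <= 1:
--         return k
--     if k % 2 == 0:
--         return _fusc(k // 2)
--     return _fusc(k // 2) + _fusc(k // 2 + 1)
--
--
-- def stern_brocot(n):
--     k = 1
--     while _fusc(k) != n:
--         k += 1
--     return k - 1
-- ===== Notes on version B (the rewrite author's own statement) =====
-- stated objective: alternative
-- what changed: Replaces A's growing materialised sequence list with its per-iteration linear membership scan by a recursive fusc(k) (Stern's diatomic function) evaluated on demand while scanning successive candidate indices, returning the first index whose fusc value equals n; no list is stored.
import Mathlib
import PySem

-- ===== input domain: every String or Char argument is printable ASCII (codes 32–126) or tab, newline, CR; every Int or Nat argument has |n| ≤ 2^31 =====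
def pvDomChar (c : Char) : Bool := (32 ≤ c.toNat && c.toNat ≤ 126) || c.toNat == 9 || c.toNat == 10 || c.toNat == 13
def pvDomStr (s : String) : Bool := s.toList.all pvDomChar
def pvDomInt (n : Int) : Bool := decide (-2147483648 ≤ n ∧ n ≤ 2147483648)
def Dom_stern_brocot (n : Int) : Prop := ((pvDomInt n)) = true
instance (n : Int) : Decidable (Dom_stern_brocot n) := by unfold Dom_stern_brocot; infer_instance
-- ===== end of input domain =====

-- B replaces A's materialised-list search with a recursive fusc(k) probe per candidate index (alternative algorithm).
-- For non-positive n both Pythons loop forever (all Stern values are positive), so Pre_ excludes those inputs.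

-- ===== PORT A =====
-- fuel is a totality guard only: under Pre_ it is proved sufficient and never reached
def sternLoopA (n : Int) (fuel : Nat) (ret : List Int) (count : Int) : Int :=
  match fuel with
  | 0 => 0
  | f + 1 =>
    if n ∈ ret then (((PySem.List.index? ret n).getD 0 : Nat) : Int)
    else
      let ret2 := ret ++ [(PySem.List.pyGet? ret count).getD 0 + (PySem.List.pyGet? ret (count - 1)).getD 0]
      let ret3 := ret2 ++ [(PySem.List.pyGet? ret2 count).getD 0]
      sternLoopA n f ret3 (count + 1)

def stern_brocot (n : Int) : Int := sternLoopA n (2 ^ n.toNat + 1) [1, 1] 1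

-- ===== PORT B =====
def fusc (k : Nat) : Nat :=
  if k ≤ 1 then k
  else if k % 2 = 0 then fusc (k / 2)
  else fusc (k / 2) + fusc (k / 2 + 1)
termination_by k
decreasing_by all_goals omega

-- fuel is a totality guard only: under Pre_ it is proved sufficient and never reached
def sternLoopB (n : Int) (fuel : Nat) (k : Nat) : Int :=
  match fuel with
  | 0 => 0
  | f + 1 => if (fusc k : Int) = n then (k : Int) - 1 else sternLoopB n f (k + 1)

def stern_brocot_alt (n : Int) : Int := sternLoopB n (2 ^ n.toNat + 1) 1

-- ===== PRECONDITION & SPEC =====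
-- Pre_ excludes non-positive n, on which A (and B) never return: all Stern values are positive.
def Pre_stern_brocot (n : Int) : Prop := 1 ≤ n
instance (n : Int) : Decidable (Pre_stern_brocot n) := by unfold Pre_stern_brocot; infer_instance
def pvWitness_stern_brocot : Int := (5)

def Spec_stern_brocot (n : Int) (out : Int) : Prop := out = stern_brocot_alt n
instance (n : Int) (out : Int) : Decidable (Spec_stern_brocot n out) := by unfold Spec_stern_brocot; infer_instance

-- ===== CLAIM (what is proved, stated in full; the proofs are below) =====
def Claim_equal_stern_brocot : Prop := ∀ (n : Int), Dom_stern_brocot n → Pre_stern_brocot n → Spec_stern_brocot n (stern_brocot n)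

-- ===== LEMMAS AND PROOFS =====

lemma fusc_one : fusc 1 = 1 := by rw [fusc]; norm_num

lemma fusc_two : fusc 2 = 1 := by rw [fusc]; norm_num [fusc_one]

lemma fusc_even (k : Nat) (h : 1 ≤ k) : fusc (2 * k) = fusc k := by
  rw [fusc]
  have h1 : ¬ 2 * k ≤ 1 := by omega
  have h2 : 2 * k % 2 = 0 := by omega
  have h3 : 2 * k / 2 = k := by omega
  simp [h1, h3]

lemma fusc_odd (k : Nat) : fusc (2 * k + 1) = fusc k + fusc (k + 1) := by
  by_cases h0 : k = 0
  · subst h0; simp [fusc]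
  rw [fusc]
  have h1 : ¬ 2 * k + 1 ≤ 1 := by omega
  have h3 : (2 * k + 1) / 2 = k := by omega
  simp [h1, h3]

lemma fusc_pow (m : Nat) : fusc (2 ^ m) = 1 := by
  induction m with
  | zero => simp [fusc]
  | succ m ih =>
    have : 2 ^ (m + 1) = 2 * 2 ^ m := by ring
    rw [this, fusc_even _ (Nat.one_le_two_pow)]
    exact ih

lemma fusc_pow_succ (m : Nat) : fusc (2 ^ m + 1) = m + 1 := by
  induction m with
  | zero => simp [fusc]
  | succ m ih =>
    have : 2 ^ (m + 1) + 1 = 2 * 2 ^ m + 1 := by ring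
    rw [this, fusc_odd, fusc_pow, ih]
    omega

-- the Stern sequence prefix A materialises: S m = [fusc 1, …, fusc m]
def S (m : Nat) : List Int := (List.range m).map (fun i => ((fusc (i + 1) : Nat) : Int))

lemma S_length (m : Nat) : (S m).length = m := by simp [S]

lemma S_succ (m : Nat) : S (m + 1) = S m ++ [((fusc (m + 1) : Nat) : Int)] := by
  simp [S, List.range_succ]

lemma mem_S {n : Int} {m : Nat} : n ∈ S m ↔ ∃ i, i < m ∧ ((fusc (i + 1) : Nat) : Int) = n := by
  simp [S, List.mem_map, List.mem_range]

lemma S_get (m i : Nat) (h : i < m) : (S m)[i]? = some ((fusc (i + 1) : Nat) : Int) := by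
  simp [S, h]

-- throughout, K is the least index ≥ 1 with fusc K = n
lemma index_S {n : Int} {K : Nat} (hK1 : 1 ≤ K) (hK : ((fusc K : Nat) : Int) = n)
    (hmin : ∀ j, 1 ≤ j → j < K → ((fusc j : Nat) : Int) ≠ n)
    {m : Nat} (hm : K ≤ m) : PySem.List.index? (S m) n = some (K - 1) := by
  induction m with
  | zero => omega
  | succ m ih =>
    by_cases hKm : K ≤ m
    · rw [S_succ, PySem.List.index?_append_of_mem _ (mem_S.mpr ⟨K - 1, by omega, by
        have : K - 1 + 1 = K := by omega
        rw [this]; exact hK⟩)]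
      exact ih hKm
    · have hfK : ((fusc (m + 1) : Nat) : Int) = n := by
        have : m + 1 = K := by omega
        rw [this]; exact hK
      rw [S_succ, hfK]
      have hnot : n ∉ S m := by
        intro hmem
        obtain ⟨i, hi, hfi⟩ := mem_S.mp hmem
        exact hmin (i + 1) (by omega) (by omega) hfi
      rw [PySem.List.index?_append_singleton_self (S m) n hnot, S_length]
      congr 1
      omega

lemma loopA_eq {n : Int} {K : Nat} (hK1 : 1 ≤ K) (hK : ((fusc K : Nat) : Int) = n)
    (hmin : ∀ j, 1 ≤ j → j < K → ((fusc j : Nat) : Int) ≠ n) :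
    ∀ F c, 1 ≤ c → K ≤ 2 * c + 2 * F →
      sternLoopA n (F + 1) (S (2 * c)) ((c : Nat) : Int) = ((K - 1 : Nat) : Int) := by
  intro F
  induction F with
  | zero =>
    intro c hc hbound
    rw [sternLoopA]
    have hmem : n ∈ S (2 * c) := mem_S.mpr ⟨K - 1, by omega, by
      have : K - 1 + 1 = K := by omega
      rw [this]; exact hK⟩
    rw [if_pos hmem, index_S hK1 hK hmin (by omega)]
    simp
  | succ F ih =>
    intro c hc hbound
    rw [sternLoopA]
    by_cases hmem : n ∈ S (2 * c)
    · rw [if_pos hmem]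
      have : K ≤ 2 * c := by
        by_contra hlt
        obtain ⟨i, hi, hfi⟩ := mem_S.mp hmem
        exact hmin (i + 1) (by omega) (by omega) hfi
      rw [index_S hK1 hK hmin this]
      simp
    · rw [if_neg hmem]
      -- evaluate the two appended elements
      have hc2 : c < (S (2 * c)).length := by rw [S_length]; omega
      have hget1 : PySem.List.pyGet? (S (2 * c)) ((c : Nat) : Int) = some ((fusc (c + 1) : Nat) : Int) := by
        rw [PySem.List.pyGet?_natCast, S_get _ _ (by omega)]
      have hcast : ((c : Nat) : Int) - 1 = (((c - 1 : Nat) : Nat) : Int) := by omega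
      have hget2 : PySem.List.pyGet? (S (2 * c)) (((c : Nat) : Int) - 1) = some ((fusc c : Nat) : Int) := by
        rw [hcast, PySem.List.pyGet?_natCast, S_get _ _ (by omega)]
        have : c - 1 + 1 = c := by omega
        rw [this]
      have hget3 : PySem.List.pyGet? (S (2 * c) ++ [((fusc (c + 1) : Nat) : Int) + ((fusc c : Nat) : Int)]) ((c : Nat) : Int)
          = some ((fusc (c + 1) : Nat) : Int) := by
        rw [PySem.List.pyGet?_natCast, List.getElem?_append_left hc2, S_get _ _ (by omega)]
      rw [hget1, hget2]
      simp only [Option.getD_some]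
      rw [hget3]
      simp only [Option.getD_some]
      have hS : S (2 * c) ++ [((fusc (c + 1) : Nat) : Int) + ((fusc c : Nat) : Int)] ++ [((fusc (c + 1) : Nat) : Int)]
          = S (2 * (c + 1)) := by
        have h1 : 2 * (c + 1) = (2 * c + 1) + 1 := by ring
        rw [h1, S_succ, S_succ]
        have e1 : fusc (2 * c + 1) = fusc c + fusc (c + 1) := fusc_odd c
        have e2 : fusc (2 * c + 1 + 1) = fusc (c + 1) := by
          have : 2 * c + 1 + 1 = 2 * (c + 1) := by ring
          rw [this, fusc_even _ (by omega)]
        rw [e1, e2]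
        push_cast
        ring_nf
      have hcnt : ((c : Nat) : Int) + 1 = (((c + 1 : Nat) : Nat) : Int) := by push_cast; ring
      rw [hS, hcnt]
      exact ih (c + 1) (by omega) (by omega)

lemma loopB_eq {n : Int} {K : Nat} (hK : ((fusc K : Nat) : Int) = n)
    (hmin : ∀ j, 1 ≤ j → j < K → ((fusc j : Nat) : Int) ≠ n) :
    ∀ F k0, 1 ≤ k0 → k0 ≤ K → K ≤ k0 + F →
      sternLoopB n (F + 1) k0 = ((k0 : Nat) : Int) - 1 + ((K : Int) - (k0 : Int)) := by
  intro F
  induction F with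
  | zero =>
    intro k0 h1 h2 h3
    have : k0 = K := by omega
    subst this
    rw [sternLoopB, if_pos hK]
    ring
  | succ F ih =>
    intro k0 h1 h2 h3
    rw [sternLoopB]
    by_cases hhit : ((fusc k0 : Nat) : Int) = n
    · have : k0 = K := by
        by_contra hne
        exact hmin k0 h1 (by omega) hhit
      subst this
      rw [if_pos hhit]
      ring
    · have hne : k0 ≠ K := fun h => hhit (h ▸ hK)
      rw [if_neg hhit]
      have := ih (k0 + 1) (by omega) (by omega) (by omega)
      rw [this]
      push_cast
      ring

-- ===== VERDICT (by name: the statement is the Claim_ definition above) =====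
theorem stern_brocot_spec : Claim_equal_stern_brocot := by
  intro n hdom hpre
  unfold Spec_stern_brocot
  have hpre' : 1 ≤ n := hpre
  set m := n.toNat with hm
  have hm1 : 1 ≤ m := by omega
  have hn : ((m : Nat) : Int) = n := by omega
  -- existence of a hit: fusc (2^(m-1)+1) = m
  have hhit : ((fusc (2 ^ (m - 1) + 1) : Nat) : Int) = n := by
    have h := fusc_pow_succ (m - 1)
    rw [h]
    omega
  have hex : ∃ k, 1 ≤ k ∧ ((fusc k : Nat) : Int) = n :=
    ⟨2 ^ (m - 1) + 1, Nat.le_add_left 1 _, hhit⟩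
  let K := Nat.find hex
  have hKspec := Nat.find_spec hex
  have hK1 : 1 ≤ K := hKspec.1
  have hK : ((fusc K : Nat) : Int) = n := hKspec.2
  have hmin : ∀ j, 1 ≤ j → j < K → ((fusc j : Nat) : Int) ≠ n := by
    intro j hj1 hjK hfj
    exact Nat.find_min hex hjK ⟨hj1, hfj⟩
  have hKb : K ≤ 2 ^ (m - 1) + 1 := Nat.find_min' hex ⟨Nat.le_add_left 1 _, hhit⟩
  have hpow : 2 ^ (m - 1) ≤ 2 ^ m := Nat.pow_le_pow_right (by omega) (by omega)
  -- A side
  have hA : stern_brocot n = ((K - 1 : Nat) : Int) := by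
    have h0 := loopA_eq hK1 hK hmin (2 ^ m) 1 (le_refl 1) (by omega)
    rw [show S (2 * 1) = [1, 1] from by norm_num [S, List.range_succ, fusc_one, fusc_two],
        show (((1 : Nat) : Nat) : Int) = 1 from rfl] at h0
    unfold stern_brocot
    rw [← hm]
    exact h0
  -- B side
  have hB : stern_brocot_alt n = ((K - 1 : Nat) : Int) := by
    have := loopB_eq hK hmin (2 ^ m) 1 (by omega) hK1 (by omega)
    unfold stern_brocot_alt
    rw [this]
    push_cast
    omega
  rw [hA, hB]
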